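-- pv_equiv track=rewrite | github.com/healtermon/cs1010s | Hard-qns/counting-cycles.py | remove_duplicate_cycles
-- ===== SOURCE A (Python) =====
-- def remove_duplicates_from_list(l:list,comparison_operator) -> list:
--     """comparison operator should take 2 arguments. Compares the first thing in the list to every other,
--     and if it matches, creates another list with the first thing removed, then calls itself on the rest of the list.
--     Otherwise the item has no duplicates, and concatenates the first item to the result of calling itself on the rest of the list instead.
--     This is lisp-style function, unfortunately not as fast due to the different implementation of lists, but simple enough to be easy to implement and read"""
--     if len(l)<=1: return l
--     first,rest = l[0],l[1:]
--     for i in rest: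
--         if comparison_operator(first,i): return remove_duplicates_from_list(rest,comparison_operator)
--     return [first] + remove_duplicates_from_list(rest,comparison_operator)
--
-- def remove_duplicate_cycles(l:list) -> list:
--     """takes a list of cycles, removes duplicates by checking each list against every other"""
--     def equal_paths(p1:list,p2:list) -> bool: # TODO: test whether this works, honestly it looks simple enough that it should work
--         """because I don't trust python's built-in '==' operator"""
--         def equal_path_item(x,y) -> bool:
--             if type(x) is not type(y): return False
--             if type(x) is list: return x is y
--             elif type(x) is int: return x == y
--             else: raise Exception("where the fuck are you using this function? The things u compare are neither integers or lists")
--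
--         if len(p1) != len(p2): return False
--         for i in range(len(p1)):
--             if not equal_path_item(p1[i],p2[i]): return False
--         return True
--     return remove_duplicates_from_list(l,equal_paths)
-- ===== SOURCE B (Python) =====
-- def remove_duplicate_cycles(l: list) -> list:
--     """Keep the last occurrence of each cycle: scan backwards keeping the
--     first-seen (hashed as a tuple), then reverse the collected output."""
--     seen = set()
--     out = []
--     for p in reversed(l):
--         t = tuple(p)
--         if t not in seen:
--             seen.add(t)
--             out.append(p)
--     out.reverse()
--     return out
-- ===== Notes on version B (the rewrite author's own statement) =====
-- stated objective: faster
-- what changed: Replaces the recursive remove-first-if-duplicated-later scheme with its O(n^2) pairwise equal_paths scans by a single backward pass that hashes each cycle as a tuple into a set, keeping first-seen (= last occurrence) and reversing the output.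
import Mathlib
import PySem

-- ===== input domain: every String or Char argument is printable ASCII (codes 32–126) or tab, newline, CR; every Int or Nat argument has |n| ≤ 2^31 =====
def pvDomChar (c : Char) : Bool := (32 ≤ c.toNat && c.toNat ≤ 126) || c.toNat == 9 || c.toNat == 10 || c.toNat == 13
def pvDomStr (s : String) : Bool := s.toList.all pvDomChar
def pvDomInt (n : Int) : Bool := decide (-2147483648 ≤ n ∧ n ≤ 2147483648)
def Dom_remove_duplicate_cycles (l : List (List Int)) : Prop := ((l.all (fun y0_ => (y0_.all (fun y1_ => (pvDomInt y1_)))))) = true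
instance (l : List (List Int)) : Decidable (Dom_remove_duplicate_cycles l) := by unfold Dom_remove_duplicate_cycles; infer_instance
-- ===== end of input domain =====

-- B replaces A's O(n^2) recursive pairwise-scan dedup by a single backward pass with a seen-set, keeping each cycle's last occurrence (measured faster).


-- ===== PORT A =====
-- equal_path_item: both compared items are ints here, so the int branch fires
def pvEqualPathItem (x y : Int) : Bool := x == y

-- equal_paths: length check, then element-wise comparison over range(len(p1))
def pvEqualPaths (p1 p2 : List Int) : Bool :=
  if p1.length != p2.length then false
  else (List.range p1.length).all (fun i => pvEqualPathItem (p1.getD i 0) (p2.getD i 0))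

-- remove_duplicates_from_list specialised to the comparator equal_paths
def pvRemoveDups : List (List Int) → List (List Int)
  | [] => []
  | first :: rest =>
    if rest.any (fun i => pvEqualPaths first i) then pvRemoveDups rest
    else first :: pvRemoveDups rest

def remove_duplicate_cycles (l : List (List Int)) : List (List Int) :=
  pvRemoveDups l

-- ===== PORT B =====
-- backward scan: keep first-seen in a set, append in scan order, reverse at the end
def remove_duplicate_cycles_alt (l : List (List Int)) : List (List Int) :=
  (l.reverse.foldl
    (fun (st : PySem.Set (List Int) × List (List Int)) p =>
      if PySem.Set.contains st.1 p then st
      else (PySem.Set.add st.1 p, st.2 ++ [p]))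
    (PySem.Set.empty, [])).2.reverse

-- ===== PRECONDITION & SPEC =====
def Spec_remove_duplicate_cycles (l : List (List Int)) (out : List (List Int)) : Prop := out = remove_duplicate_cycles_alt l
instance (l : List (List Int)) (out : List (List Int)) : Decidable (Spec_remove_duplicate_cycles l out) := by unfold Spec_remove_duplicate_cycles; infer_instance

-- ===== CLAIM (what is proved, stated in full; the proofs are below) =====
def Claim_equal_remove_duplicate_cycles : Prop := ∀ (l : List (List Int)), Dom_remove_duplicate_cycles l → Spec_remove_duplicate_cycles l (remove_duplicate_cycles l)

-- ===== LEMMAS AND PROOFS =====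

theorem pvEqualPaths_iff (p q : List Int) : pvEqualPaths p q = true ↔ p = q := by
  unfold pvEqualPaths pvEqualPathItem
  by_cases h : p.length = q.length
  · simp [h, List.all_eq_true, List.mem_range]
    constructor
    · intro hall
      apply List.ext_getElem h
      intro i h1 h2
      have := hall i h2
      rw [List.getElem?_eq_getElem h1, List.getElem?_eq_getElem h2] at this
      simpa using this
    · rintro rfl i _; rfl
  · rw [if_pos (by simp [h] : (p.length != q.length) = true)]
    simp only [Bool.false_eq_true, false_iff]
    intro e; exact h (congrArg List.length e)

theorem pvAny_iff (x : List Int) (rest : List (List Int)) :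
    (rest.any (fun i => pvEqualPaths x i) = true) ↔ x ∈ rest := by
  simp only [List.any_eq_true, pvEqualPaths_iff]
  constructor
  · rintro ⟨y, hy, rfl⟩; exact hy
  · intro h; exact ⟨x, h, rfl⟩

-- A's recursion in keep-last form
theorem pvRemoveDups_cons (x : List Int) (rest : List (List Int)) :
    pvRemoveDups (x :: rest)
      = if x ∈ rest then pvRemoveDups rest else x :: pvRemoveDups rest := by
  by_cases h : x ∈ rest
  · simp [pvRemoveDups, (pvAny_iff x rest).2 h, h]
  · have : rest.any (fun i => pvEqualPaths x i) = false := by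
      cases e : rest.any (fun i => pvEqualPaths x i)
      · rfl
      · exact absurd ((pvAny_iff x rest).1 e) h
    simp [pvRemoveDups, this, h]

-- membership in the first component of B's fold
theorem pvFold_fst_mem (ys : List (List Int)) :
    ∀ (s : PySem.Set (List Int)) (acc : List (List Int)) (x : List Int),
    (x ∈ (ys.foldl
      (fun (st : PySem.Set (List Int) × List (List Int)) p =>
        if PySem.Set.contains st.1 p then st
        else (PySem.Set.add st.1 p, st.2 ++ [p])) (s, acc)).1)
      ↔ (x ∈ s ∨ x ∈ ys) := by
  induction ys with
  | nil => intro s acc x; simp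
  | cons y t ih =>
    intro s acc x
    simp only [List.foldl_cons]
    by_cases hc : PySem.Set.contains s y = true
    · have hy : y ∈ s := by
        simpa [PySem.Set.contains] using hc
      simp only [hc, if_pos]
      rw [ih]
      constructor
      · rintro (h | h)
        · exact Or.inl h
        · exact Or.inr (List.mem_cons_of_mem _ h)
      · rintro (h | h)
        · exact Or.inl h
        · rcases List.mem_cons.1 h with rfl | h
          · exact Or.inl hy
          · exact Or.inr h
    · simp only [hc, if_neg, Bool.false_eq_true, not_false_iff]
      rw [ih]
      simp [PySem.Set.mem_add]
      tauto

-- B's fold in keep-last form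
theorem pvAlt_cons (x : List Int) (rest : List (List Int)) :
    remove_duplicate_cycles_alt (x :: rest)
      = if x ∈ rest then remove_duplicate_cycles_alt rest
        else x :: remove_duplicate_cycles_alt rest := by
  unfold remove_duplicate_cycles_alt
  rw [List.reverse_cons, List.foldl_append]
  set st := rest.reverse.foldl
      (fun (st : PySem.Set (List Int) × List (List Int)) p =>
        if PySem.Set.contains st.1 p then st
        else (PySem.Set.add st.1 p, st.2 ++ [p]))
      ((PySem.Set.empty : PySem.Set (List Int)), ([] : List (List Int))) with hst
  have hmem : (x ∈ st.1) ↔ x ∈ rest := by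
    rw [hst, pvFold_fst_mem]
    simp
  by_cases h : x ∈ rest
  · have hc : PySem.Set.contains st.1 x = true := by
      simpa [PySem.Set.contains] using hmem.2 h
    rw [if_pos h]
    simp only [List.foldl_cons, List.foldl_nil]
    rw [if_pos hc]
  · have hc : PySem.Set.contains st.1 x = false := by
      cases e : PySem.Set.contains st.1 x
      · rfl
      · exact absurd (hmem.1 (by simpa [PySem.Set.contains] using e)) h
    rw [if_neg h]
    simp only [List.foldl_cons, List.foldl_nil]
    rw [if_neg (by intro e; rw [hc] at e; exact Bool.false_ne_true e)]
    simp

theorem pvMain (l : List (List Int)) :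
    pvRemoveDups l = remove_duplicate_cycles_alt l := by
  induction l with
  | nil => rfl
  | cons x rest ih =>
    rw [pvRemoveDups_cons, pvAlt_cons, ih]

-- ===== VERDICT (by name: the statement is the Claim_ definition above) =====
theorem remove_duplicate_cycles_spec : Claim_equal_remove_duplicate_cycles := by
  intro l _
  unfold Spec_remove_duplicate_cycles remove_duplicate_cycles
  exact pvMain l
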